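-- pv_equiv track=rewrite | github.com/Qiskit/qiskit-addon-cutting | circuit_knitting_toolbox/utils/transforms.py | _qubit_map_from_partition_labels
-- ===== SOURCE A (Python) =====
-- from collections import defaultdict
-- from collections.abc import Sequence, Iterable, Hashable, MutableMapping
--
-- def _qubit_map_from_partition_labels(
--     partition_labels: Sequence[Hashable],
-- ) -> tuple[list[tuple[Hashable, int]], dict[Hashable, list[int]]]:
--     """Generate a qubit map given a qubit partitioning."""
--     qubit_map: list[tuple[Hashable, int]] = []
--     qubits_by_subsystem: MutableMapping[Hashable, list[int]] = defaultdict(list)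
--     for i, qubit_label in enumerate(partition_labels):
--         current_label_qubits = qubits_by_subsystem[qubit_label]
--         qubit_map.append((qubit_label, len(current_label_qubits)))
--         current_label_qubits.append(i)
--     return qubit_map, dict(qubits_by_subsystem)
-- ===== SOURCE B (Python) =====
-- def _qubit_map_from_partition_labels(partition_labels):
--     """Two independent passes instead of one interleaved defaultdict-of-lists loop:
--     ranks from an integer counter, grouping as a comprehension over deduplicated labels."""
--     labels = list(partition_labels)
--     counts = {}
--     qubit_map = []
--     for label in labels:
--         rank = counts.get(label, 0)
--         qubit_map.append((label, rank))
--         counts[label] = rank + 1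
--     qubits_by_subsystem = {
--         label: [i for i, x in enumerate(labels) if x == label]
--         for label in dict.fromkeys(labels)
--     }
--     return qubit_map, qubits_by_subsystem
-- ===== Notes on version B (the rewrite author's own statement) =====
-- stated objective: alternative
-- what changed: Replaces the single interleaved loop that grows a defaultdict of index lists and reads each rank off the current list length with two independent passes: an integer-counter loop producing the ranks, and a dict comprehension over the deduplicated labels producing the grouping.
import Mathlib
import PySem

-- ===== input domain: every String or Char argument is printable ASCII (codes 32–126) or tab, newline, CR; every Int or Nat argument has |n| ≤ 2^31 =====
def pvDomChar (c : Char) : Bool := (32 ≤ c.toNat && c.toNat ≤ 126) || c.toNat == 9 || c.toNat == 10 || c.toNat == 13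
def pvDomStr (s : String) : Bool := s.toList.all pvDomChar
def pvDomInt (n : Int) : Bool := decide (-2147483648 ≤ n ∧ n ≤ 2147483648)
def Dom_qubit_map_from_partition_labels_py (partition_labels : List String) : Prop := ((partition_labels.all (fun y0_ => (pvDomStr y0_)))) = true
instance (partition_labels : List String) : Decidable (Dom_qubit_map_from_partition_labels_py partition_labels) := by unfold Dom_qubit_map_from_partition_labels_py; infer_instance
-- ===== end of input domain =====

-- B replaces A's single interleaved defaultdict loop by two independent passes (ranks as
-- prefix counts; grouping as a comprehension over the deduplicated labels): alternative
-- decomposition, not faster.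

-- ===== PORT A =====
def qubit_map_from_partition_labels_py (partition_labels : List String) : (List (String × Int)) × (List (String × List Int)) :=
  let st := (PySem.List.enumerate partition_labels 0).foldl
    (fun (st : List (String × Int) × PySem.Dict String (List Int)) p =>
      let cur := st.2.getD p.2 []
      (st.1 ++ [(p.2, (cur.length : Int))], st.2.modify p.2 [] (fun q => q ++ [p.1])))
    ([], PySem.Dict.empty)
  (st.1, st.2.items)

-- ===== PORT B =====
def qubit_map_from_partition_labels_py_alt (partition_labels : List String) : (List (String × Int)) × (List (String × List Int)) :=
  let qubit_map := (partition_labels.foldl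
    (fun (st : List (String × Int) × PySem.Dict String Int) label =>
      let rank := st.2.getD label 0
      (st.1 ++ [(label, rank)], st.2.insert label (rank + 1)))
    ([], PySem.Dict.empty)).1
  let groups := (PySem.List.dedup partition_labels).foldl
    (fun d label => d.insert label
      (((PySem.List.enumerate partition_labels 0).filter (fun q => q.2 == label)).map (fun q => q.1)))
    PySem.Dict.empty
  (qubit_map, groups.items)

-- ===== PRECONDITION & SPEC =====
def Spec_qubit_map_from_partition_labels_py (partition_labels : List String) (out : (List (String × Int)) × (List (String × List Int))) : Prop := out = qubit_map_from_partition_labels_py_alt partition_labels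
instance (partition_labels : List String) (out : (List (String × Int)) × (List (String × List Int))) : Decidable (Spec_qubit_map_from_partition_labels_py partition_labels out) := by unfold Spec_qubit_map_from_partition_labels_py; infer_instance

-- ===== CLAIM (what is proved, stated in full; the proofs are below) =====
def Claim_equal_qubit_map_from_partition_labels_py : Prop := ∀ (partition_labels : List String), Dom_qubit_map_from_partition_labels_py partition_labels → Spec_qubit_map_from_partition_labels_py partition_labels (qubit_map_from_partition_labels_py partition_labels)

-- ===== LEMMAS AND PROOFS =====

-- fst-component of A's fold, dict threaded through
def pvSpecMap : List (Int × String) → PySem.Dict String (List Int) → List (String × Int)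
  | [], _ => []
  | p :: ps, d => (p.2, ((d.getD p.2 []).length : Int)) :: pvSpecMap ps (d.modify p.2 [] (fun q => q ++ [p.1]))

-- reference value of the qubit map: rank = count in the processed prefix
def pvMspec : List String → List String → List (String × Int)
  | _, [] => []
  | pre, x :: xs => (x, (pre.count x : Int)) :: pvMspec (pre ++ [x]) xs

theorem pv_foldA (ps : List (Int × String)) (m : List (String × Int)) (d : PySem.Dict String (List Int)) :
    ps.foldl
      (fun (st : List (String × Int) × PySem.Dict String (List Int)) p =>
        let cur := st.2.getD p.2 []
        (st.1 ++ [(p.2, (cur.length : Int))], st.2.modify p.2 [] (fun q => q ++ [p.1])))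
      (m, d)
    = (m ++ pvSpecMap ps d, ps.foldl (fun d p => d.modify p.2 [] (fun q => q ++ [p.1])) d) := by
  induction ps generalizing m d with
  | nil => simp [pvSpecMap]
  | cons p ps ih => simp [pvSpecMap, ih]

theorem pv_specMap_eq (xs : List String) : ∀ (k : Int) (d : PySem.Dict String (List Int)) (pre : List String),
    (∀ l, (d.getD l []).length = pre.count l) →
    pvSpecMap (PySem.List.enumerate xs k) d = pvMspec pre xs := by
  induction xs with
  | nil => intro k d pre _; simp [PySem.List.enumerate_nil, pvSpecMap, pvMspec]
  | cons x xs ih =>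
    intro k d pre h
    rw [PySem.List.enumerate_cons]
    simp only [pvSpecMap, pvMspec]
    refine congrArg₂ _ (by rw [h x]) ?_
    refine ih (k + 1) _ (pre ++ [x]) ?_
    intro l
    rw [PySem.Dict.getD_modify]
    by_cases hl : l = x
    · subst hl
      simp [List.count_append, h l]
    · simp [hl, List.count_append, h l, List.count_singleton]
      simp [Ne.symm hl]

-- fst-component of B's counter fold
def pvRanks : List String → PySem.Dict String Int → List (String × Int)
  | [], _ => []
  | x :: xs, c => (x, c.getD x 0) :: pvRanks xs (c.insert x (c.getD x 0 + 1))

theorem pv_foldB (xs : List String) (m : List (String × Int)) (c : PySem.Dict String Int) :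
    (xs.foldl
      (fun (st : List (String × Int) × PySem.Dict String Int) label =>
        let rank := st.2.getD label 0
        (st.1 ++ [(label, rank)], st.2.insert label (rank + 1)))
      (m, c)).1
    = m ++ pvRanks xs c := by
  induction xs generalizing m c with
  | nil => simp [pvRanks]
  | cons x xs ih => simp [pvRanks, ih]

theorem pv_ranks_eq (xs : List String) : ∀ (c : PySem.Dict String Int) (pre : List String),
    (∀ l, c.getD l 0 = (pre.count l : Int)) →
    pvRanks xs c = pvMspec pre xs := by
  induction xs with
  | nil => intro c pre _; simp [pvRanks, pvMspec]
  | cons x xs ih =>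
    intro c pre h
    simp only [pvRanks, pvMspec]
    refine congrArg₂ _ (by rw [h x]) ?_
    refine ih _ (pre ++ [x]) ?_
    intro l
    rw [PySem.Dict.getD_insert]
    by_cases hl : l = x
    · subst hl
      simp [List.count_append, h l]
    · simp [hl, List.count_append, h l]
      simp [Ne.symm hl]

-- A's final dict lookup: the indices whose label is c, in order
theorem pv_dictA_getD (pairs : List (Int × String)) (c : String) :
    (pairs.foldl (fun d p => d.modify p.2 [] (fun q => q ++ [p.1])) PySem.Dict.empty).getD c []
    = (pairs.filter (fun q => q.2 == c)).map (fun q => q.1) := by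
  have hswap : pairs.foldl (fun d p => d.modify p.2 [] (fun q => q ++ [p.1])) PySem.Dict.empty
      = (pairs.map Prod.swap).foldl (fun d p => d.modify p.1 [] (fun q => q ++ [p.2])) PySem.Dict.empty := by
    rw [List.foldl_map]
    rfl
  rw [hswap, PySem.Dict.getD_foldl_modify_append]
  simp [List.filter_map, List.map_map, Function.comp_def, Prod.swap]

theorem pv_sndA (labels : List String) :
    ((PySem.List.enumerate labels 0).foldl (fun d p => d.modify p.2 [] (fun q => q ++ [p.1]))
        PySem.Dict.empty).items
    = (PySem.List.dedup labels).map
        (fun l => (l, ((PySem.List.enumerate labels 0).filter (fun q => q.2 == l)).map (fun q => q.1))) := by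
  set pairs := PySem.List.enumerate labels 0 with hpairs
  set df := pairs.foldl (fun d p => d.modify p.2 [] (fun q => q ++ [p.1])) PySem.Dict.empty with hdf
  have hkeys : df.keys = PySem.List.dedup labels := by
    rw [hdf, PySem.Dict.keys_foldl_modify_key]
    rw [PySem.Dict.keys_empty, PySem.Set.update_nil_left, hpairs, PySem.List.map_snd_enumerate]
    simp
  have hnd : df.keys.Nodup := by
    rw [hkeys]; exact PySem.List.nodup_dedup labels
  rw [PySem.Dict.items_eq_map_keys df hnd []]
  rw [hkeys]
  refine List.map_congr_left ?_
  intro l _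
  rw [hdf, pv_dictA_getD]

theorem pv_sndB (labels : List String) :
    ((PySem.List.dedup labels).foldl
        (fun d label => d.insert label
          (((PySem.List.enumerate labels 0).filter (fun q => q.2 == label)).map (fun q => q.1)))
        PySem.Dict.empty).items
    = (PySem.List.dedup labels).map
        (fun l => (l, ((PySem.List.enumerate labels 0).filter (fun q => q.2 == l)).map (fun q => q.1))) := by
  have h := PySem.Dict.items_foldl_insert_fresh (PySem.List.dedup labels) (fun l => l)
    (fun label => ((PySem.List.enumerate labels 0).filter (fun q => q.2 == label)).map (fun q => q.1))
    PySem.Dict.empty (fun a _ => PySem.Dict.contains_empty a)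
    (by simp)
  simp at h
  exact h

-- ===== VERDICT (by name: the statement is the Claim_ definition above) =====
theorem qubit_map_from_partition_labels_py_spec : Claim_equal_qubit_map_from_partition_labels_py := by
  intro labels _
  unfold Spec_qubit_map_from_partition_labels_py
  unfold qubit_map_from_partition_labels_py qubit_map_from_partition_labels_py_alt
  simp only []
  rw [pv_foldA]
  refine Prod.ext ?_ ?_
  · show [] ++ pvSpecMap (PySem.List.enumerate labels 0) PySem.Dict.empty = _
    rw [List.nil_append]
    rw [pv_specMap_eq labels 0 PySem.Dict.empty []
      (by intro l; simp [PySem.Dict.getD_empty])]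
    rw [pv_foldB]
    rw [pv_ranks_eq labels PySem.Dict.empty []
      (by intro l; simp [PySem.Dict.getD_empty])]
    simp
  · show ((PySem.List.enumerate labels 0).foldl _ PySem.Dict.empty).items = _
    rw [pv_sndA, ← pv_sndB]
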